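-- pv_equiv track=rewrite | github.com/Picucu/Capstone-Network-Topology | visualizer.py | csv_record_reader
-- ===== SOURCE A (Python) =====
-- def csv_record_reader(csv_reader):
--     prev_row_blank = True
--     for row in csv_reader:
--         row_blank = (row[0] == '')
--         if not row_blank:
--             yield row
--             prev_row_blank = False
--         elif not prev_row_blank:
--             return
-- ===== SOURCE B (Python) =====
-- def csv_record_reader(csv_reader):
--     # Two-phase decomposition: first loop skips leading blank rows and yields
--     # the first record; second loop yields records until the terminating blank.
--     it = iter(csv_reader)
--     for row in it:
--         if row[0] != '':
--             yield row
--             break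
--     else:
--         return
--     for row in it:
--         if row[0] == '':
--             return
--         yield row
-- ===== Notes on version B (the rewrite author's own statement) =====
-- stated objective: idiomatic
-- what changed: Replaces the single stateful loop with a prev_row_blank flag by a two-phase decomposition: a skip/drop loop over leading blank rows followed by a take loop until the terminating blank row.
import Mathlib
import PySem

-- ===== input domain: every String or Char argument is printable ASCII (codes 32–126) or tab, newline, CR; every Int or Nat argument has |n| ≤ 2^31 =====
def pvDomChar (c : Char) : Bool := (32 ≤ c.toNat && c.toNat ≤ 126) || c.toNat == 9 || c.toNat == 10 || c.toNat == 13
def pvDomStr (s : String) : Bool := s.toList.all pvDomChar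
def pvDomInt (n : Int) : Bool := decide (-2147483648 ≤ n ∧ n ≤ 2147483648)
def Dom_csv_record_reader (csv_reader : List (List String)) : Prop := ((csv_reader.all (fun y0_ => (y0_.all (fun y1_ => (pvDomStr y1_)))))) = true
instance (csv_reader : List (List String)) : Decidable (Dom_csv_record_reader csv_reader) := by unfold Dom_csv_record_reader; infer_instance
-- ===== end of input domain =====

-- B replaces A's single stateful loop (prev_row_blank flag) by a two-phase
-- decomposition: skip leading blank rows, then take rows until the terminating
-- blank row. Equal return values on Pre_ (inputs without empty rows).
-- ===== PORT A =====
-- row[0] is read via headD ""; the IndexError case (an empty row) is excluded by Pre_.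
def csvAGo : List (List String) → Bool → List (List String)
  | [], _ => []
  | row :: rest, prev_row_blank =>
      let row_blank := (row.headD "" == "")
      if !row_blank then row :: csvAGo rest false
      else if !prev_row_blank then []
      else csvAGo rest prev_row_blank

def csv_record_reader (csv_reader : List (List String)) : List (List String) :=
  csvAGo csv_reader true

-- ===== PORT B =====
-- phase 2: yield rows until a blank row
def csvBTake : List (List String) → List (List String)
  | [] => []
  | row :: rest => if row.headD "" == "" then [] else row :: csvBTake rest

-- phase 1: skip leading blank rows, then hand over to phase 2 with the first record
def csvBSkip : List (List String) → List (List String)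
  | [] => []
  | row :: rest => if row.headD "" != "" then row :: csvBTake rest else csvBSkip rest

def csv_record_reader_alt (csv_reader : List (List String)) : List (List String) :=
  csvBSkip csv_reader

-- ===== PRECONDITION & SPEC =====
-- Pre_ excludes exactly the inputs on which A (and B) raises IndexError on row[0]:
-- those containing an empty row that is reached, i.e. not preceded by a terminator
-- (a blank row coming after a nonblank row) within the prefix before the first empty row.
def Pre_csv_record_reader (csv_reader : List (List String)) : Prop :=
  [] ∉ csv_reader ∨
  (((csv_reader.takeWhile (fun r => r ≠ [])).dropWhile
      (fun r => r.headD "" == "")).any (fun r => r.headD "" == "")) = true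
instance (csv_reader : List (List String)) : Decidable (Pre_csv_record_reader csv_reader) := by
  unfold Pre_csv_record_reader; infer_instance
def pvWitness_csv_record_reader : List (List String) := [[""], ["a"], ["b", "c"], [""], ["d"]]

def Spec_csv_record_reader (csv_reader : List (List String)) (out : List (List String)) : Prop := out = csv_record_reader_alt csv_reader
instance (csv_reader : List (List String)) (out : List (List String)) : Decidable (Spec_csv_record_reader csv_reader out) := by unfold Spec_csv_record_reader; infer_instance

-- ===== CLAIM (what is proved, stated in full; the proofs are below) =====
def Claim_equal_csv_record_reader : Prop := ∀ (csv_reader : List (List String)), Dom_csv_record_reader csv_reader → Pre_csv_record_reader csv_reader → Spec_csv_record_reader csv_reader (csv_record_reader csv_reader)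

-- ===== LEMMAS AND PROOFS =====

-- ===== VERDICT (by name: the statement is the Claim_ definition above) =====
-- With prev_row_blank = false, A's loop is exactly B's take phase.
theorem csvAGo_false (l : List (List String)) : csvAGo l false = csvBTake l := by
  induction l with
  | nil => rfl
  | cons row rest ih =>
      simp only [csvAGo, csvBTake]
      by_cases h : row.headD "" == "" <;> simp [ih]

-- With prev_row_blank = true, A's loop is B's skip phase.
theorem csvAGo_true (l : List (List String)) : csvAGo l true = csvBSkip l := by
  induction l with
  | nil => rfl
  | cons row rest ih =>
      simp only [csvAGo, csvBSkip]
      by_cases h : row.headD "" == "" <;> simp [ih, csvAGo_false]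

theorem csv_record_reader_spec : Claim_equal_csv_record_reader := by
  intro l _ _
  unfold Spec_csv_record_reader csv_record_reader csv_record_reader_alt
  exact csvAGo_true l
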